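-- pv_equiv track=rewrite | github.com/HyeM207/Algorithm | Programmers/[Prg] 할인행사.py | solution
-- ===== SOURCE A (Python) =====
-- from collections import Counter
--
-- def solution(want, number, discount):
--     answer = 0
--     d = {}
--     for i in range(len(want)) :
--         d[want[i]]=number[i]
--
--     # 1일부터 되는 막날까지
--     for i in range(0, len(discount)-9):
--         cnt = Counter(discount[i:i+10])
--         tmp = Counter(d) - cnt
--         if not tmp :
--             answer += 1
--     return answer
-- ===== SOURCE B (Python) =====
-- def solution(want, number, discount):
--     n = len(discount)
--     if n < 10:
--         return 0
--     need = dict(zip(want, number))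
--     window = {}
--     for x in discount[0:10]:
--         window[x] = window.get(x, 0) + 1
--     satisfied = 0
--     for k, v in need.items():
--         if window.get(k, 0) >= v:
--             satisfied += 1
--     answer = 1 if satisfied == len(need) else 0
--     for i in range(1, n - 9):
--         out = discount[i - 1]
--         before = window.get(out, 0)
--         if out in need:
--             v = need[out]
--             if before >= v and before - 1 < v:
--                 satisfied -= 1
--         window[out] = before - 1
--         inc = discount[i + 9]
--         before = window.get(inc, 0)
--         if inc in need:
--             v = need[inc]
--             if before < v and before + 1 >= v:
--                 satisfied += 1
--         window[inc] = before + 1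
--         if satisfied == len(need):
--             answer += 1
--     return answer
-- ===== Notes on version B (the rewrite author's own statement) =====
-- stated objective: faster
-- what changed: Instead of rebuilding a Counter of each 10-day slice and subtracting counters per window, B keeps one sliding window of running counts plus a 'satisfied' tally of need-keys currently met, updating both in O(1) per slide.
import Mathlib
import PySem

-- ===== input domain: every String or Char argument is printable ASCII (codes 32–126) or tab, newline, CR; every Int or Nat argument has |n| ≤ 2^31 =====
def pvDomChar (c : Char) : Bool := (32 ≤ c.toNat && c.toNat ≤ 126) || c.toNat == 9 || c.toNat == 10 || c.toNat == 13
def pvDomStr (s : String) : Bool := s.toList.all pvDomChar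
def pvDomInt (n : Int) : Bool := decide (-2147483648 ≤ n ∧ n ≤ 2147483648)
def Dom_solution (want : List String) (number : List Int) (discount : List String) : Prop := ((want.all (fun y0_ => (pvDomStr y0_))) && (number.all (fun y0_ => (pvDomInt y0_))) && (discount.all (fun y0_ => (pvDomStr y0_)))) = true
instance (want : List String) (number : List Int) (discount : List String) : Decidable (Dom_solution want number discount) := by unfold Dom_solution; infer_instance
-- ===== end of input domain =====

-- B replaces A's per-window Counter rebuild and Counter subtraction by a single O(n) sliding
-- window that maintains running counts and a 'satisfied' tally (objective: faster).

-- ===== PORT A =====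

def dictA (want : List String) (number : List Int) : PySem.Dict String Int :=
  (PySem.List.pyRange 0 (want.length : Int) 1).foldl
    (fun d i => d.insert (PySem.List.pyGetD want i "") (PySem.List.pyGetD number i 0))
    PySem.Dict.empty

-- Counter(d) - cnt, step for step as CPython's Counter.__sub__ (keep positive differences)


def counterSub (d cnt : PySem.Dict String Int) : PySem.Dict String Int :=
  let tmp : PySem.Dict String Int :=
    d.items.foldl (fun r kv =>
      let newcount := kv.2 - cnt.getD kv.1 0
      if 0 < newcount then r.insert kv.1 newcount else r) PySem.Dict.empty
  cnt.items.foldl (fun r kv =>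
    if ¬ d.contains kv.1 ∧ kv.2 < 0 then r.insert kv.1 (0 - kv.2) else r) tmp

-- one iteration of A's window loop


def aBody (d : PySem.Dict String Int) (discount : List String) (answer : Int) (i : Int) : Int :=
  let cnt := PySem.Dict.counter (PySem.List.slice discount (some i) (some (i + 10)))
  let tmp := counterSub d cnt
  if tmp.size = 0 then answer + 1 else answer


def solution (want : List String) (number : List Int) (discount : List String) : Int :=
  let d := dictA want number
  (PySem.List.pyRange 0 ((discount.length : Int) - 9) 1).foldl (aBody d discount) 0


-- ===== PORT B =====

def needOf (want : List String) (number : List Int) : PySem.Dict String Int :=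
  (want.zip number).foldl (fun d kv => d.insert kv.1 kv.2) PySem.Dict.empty


def altStep (need : PySem.Dict String Int) (discount : List String)
    (st : PySem.Dict String Int × Int × Int) (i : Int) :
    PySem.Dict String Int × Int × Int :=
  let (window, satisfied, answer) := st
  let out := PySem.List.pyGetD discount (i - 1) ""
  let beforeOut := window.getD out 0
  let satisfied :=
    match need.get? out with
    | some v => if beforeOut ≥ v ∧ beforeOut - 1 < v then satisfied - 1 else satisfied
    | none => satisfied
  let window := window.insert out (beforeOut - 1)
  let inc := PySem.List.pyGetD discount (i + 9) ""
  let beforeInc := window.getD inc 0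
  let satisfied :=
    match need.get? inc with
    | some v => if beforeInc < v ∧ beforeInc + 1 ≥ v then satisfied + 1 else satisfied
    | none => satisfied
  let window := window.insert inc (beforeInc + 1)
  let answer := if satisfied = (need.size : Int) then answer + 1 else answer
  (window, satisfied, answer)


def solution_alt (want : List String) (number : List Int) (discount : List String) : Int :=
  let n := discount.length
  if n < 10 then 0
  else
    let need := needOf want number
    let window : PySem.Dict String Int :=
      (PySem.List.slice discount (some 0) (some 10)).foldl
        (fun w x => w.insert x (w.getD x 0 + 1)) PySem.Dict.empty
    let satisfied : Int :=
      need.items.foldl (fun s kv => if window.getD kv.1 0 ≥ kv.2 then s + 1 else s) 0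
    let answer : Int := if satisfied = (need.size : Int) then 1 else 0
    let st := (PySem.List.pyRange 1 ((n : Int) - 9) 1).foldl (altStep need discount)
      (window, satisfied, answer)
    st.2.2


-- ===== PRECONDITION & SPEC =====
-- A indexes number[i] for every i < len(want); Pre_ excludes want longer than number, where A raises IndexError.
def Pre_solution (want : List String) (number : List Int) (discount : List String) : Prop :=
  want.length ≤ number.length
instance (want : List String) (number : List Int) (discount : List String) :
    Decidable (Pre_solution want number discount) := by unfold Pre_solution; infer_instance
def pvWitness_solution : List String × List Int × List String :=
  (["a"], [2], ["a", "b", "a", "a", "a", "b", "a", "a", "a", "a", "a"])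
def Spec_solution (want : List String) (number : List Int) (discount : List String) (out : Int) : Prop := out = solution_alt want number discount
instance (want : List String) (number : List Int) (discount : List String) (out : Int) : Decidable (Spec_solution want number discount out) := by unfold Spec_solution; infer_instance

-- ===== CLAIM (what is proved, stated in full; the proofs are below) =====
def Claim_equal_solution : Prop := ∀ (want : List String) (number : List Int) (discount : List String), Dom_solution want number discount → Pre_solution want number discount → Spec_solution want number discount (solution want number discount)

-- ===== LEMMAS AND PROOFS =====

def winAt (discount : List String) (j : Nat) : List String := (discount.drop j).take 10


def winCond (d : PySem.Dict String Int) (win : List String) : Bool :=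
  d.items.all (fun kv => decide (kv.2 ≤ (win.count kv.1 : Int)))


def aCount (d : PySem.Dict String Int) (discount : List String) (u : Nat) : Int :=
  ((List.range u).countP (fun j => winCond d (winAt discount j)) : Int)


def satC (need : PySem.Dict String Int) (win : List String) : Int :=
  (need.items.countP (fun kv => decide (kv.2 ≤ (win.count kv.1 : Int))) : Nat)


lemma insert_size_pos (r : PySem.Dict String Int) (k : String) (v : Int) :
    1 ≤ (r.insert k v).size := by
  by_cases h : r.contains k = true
  · have := PySem.Dict.items_insert_of_contains (d := r) (k := k) (v := v) h
    have hk : k ∈ r.keys := (PySem.Dict.contains_iff_mem_keys r k).1 h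
    simp only [PySem.Dict.keys] at hk
    rcases List.mem_map.1 hk with ⟨p, hp, _⟩
    simp [PySem.Dict.size, this]
    exact List.length_pos_of_mem hp
  · have := PySem.Dict.items_insert_of_not_contains (d := r) (k := k) (v := v) (by simpa using h)
    simp [PySem.Dict.size, this]


lemma tmp1_size (l : List (String × Int)) (g : String → Int) :
    ∀ (r0 : PySem.Dict String Int),
    ((l.foldl (fun r kv =>
        let newcount := kv.2 - g kv.1
        if 0 < newcount then r.insert kv.1 newcount else r) r0).size = 0)
    ↔ (r0.size = 0 ∧ ∀ kv ∈ l, kv.2 ≤ g kv.1) := by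
  induction l with
  | nil => simp
  | cons a t ih =>
    intro r0
    simp only [List.foldl_cons]
    by_cases h : 0 < a.2 - g a.1
    · simp only [h, if_pos]
      rw [ih]
      constructor
      · rintro ⟨hsz, _⟩
        exact absurd hsz (by have := insert_size_pos r0 a.1 (a.2 - g a.1); omega)
      · rintro ⟨_, hall⟩
        have := hall a (List.mem_cons_self)
        omega
    · simp only [h, ih]
      constructor
      · rintro ⟨h0, hall⟩
        exact ⟨h0, fun kv hkv => by
          rcases List.mem_cons.1 hkv with rfl | hm
          · omega
          · exact hall kv hm⟩
      · rintro ⟨h0, hall⟩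
        exact ⟨h0, fun kv hkv => hall kv (List.mem_cons_of_mem _ hkv)⟩


lemma counterSub_size_zero (d : PySem.Dict String Int) (win : List String) :
    ((counterSub d (PySem.Dict.counter win)).size = 0) ↔ winCond d win = true := by
  unfold counterSub
  have h2 : ∀ tmp : PySem.Dict String Int,
      (PySem.Dict.counter win).items.foldl
        (fun r kv => if ¬ d.contains kv.1 ∧ kv.2 < 0 then r.insert kv.1 (0 - kv.2) else r) tmp
      = tmp := by
    intro tmp
    rw [PySem.List.foldl_congr_mem (g := fun r _ => r)]
    · exact PySem.List.foldl_ignore _ _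
    · intro acc kv hkv
      rw [PySem.Dict.items_counter] at hkv
      rcases List.mem_map.1 hkv with ⟨k, _, rfl⟩
      simp
  rw [h2]
  rw [tmp1_size d.items (fun k => (PySem.Dict.counter win).getD k 0) PySem.Dict.empty]
  simp only [PySem.Dict.getD_counter]
  unfold winCond
  rw [List.all_eq_true]
  constructor
  · rintro ⟨-, hall⟩ kv hkv
    simpa using hall kv hkv
  · intro hall
    exact ⟨rfl, fun kv hkv => by simpa using hall kv hkv⟩


lemma solution_eq_aCount (want : List String) (number : List Int) (discount : List String) :
    solution want number discount
      = aCount (dictA want number) discount (discount.length - 9) := by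
  unfold solution
  rw [PySem.List.foldl_congr_mem
      (g := fun a i => if winCond (dictA want number) (winAt discount i.toNat) then a + 1 else a)]
  · rw [PySem.List.foldl_if_add_one, PySem.List.pyRange_one]
    unfold aCount
    rw [List.countP_map, zero_add]
    have hn : ((discount.length : Int) - 9 - 0).toNat = discount.length - 9 := by omega
    rw [hn]
    congr 1
    refine List.countP_congr ?_
    intro j _
    simp
  · intro a i hi
    have h0 : (0:Int) ≤ i := (PySem.List.mem_pyRange_one.1 hi).1
    have hslice : PySem.List.slice discount (some i) (some (i + 10)) = winAt discount i.toNat := by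
      rw [PySem.List.slice_toNat discount h0 (by omega)]
      unfold winAt
      congr 1
      omega
    unfold aBody
    simp only [hslice]
    by_cases hc : winCond (dictA want number) (winAt discount i.toNat) = true
    · rw [if_pos hc, if_pos ((counterSub_size_zero _ _).2 hc)]
    · rw [if_neg hc, if_neg (fun h => hc ((counterSub_size_zero _ _).1 h))]

-- need = dict(zip(want, number))


lemma zipfold (ws : List String) :
    ∀ (ns : List Int) (d0 : PySem.Dict String Int), ws.length ≤ ns.length →
    (List.range ws.length).foldl (fun d i => d.insert (ws.getD i "") (ns.getD i 0)) d0
    = (ws.zip ns).foldl (fun d kv => d.insert kv.1 kv.2) d0 := by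
  induction ws with
  | nil => intro ns d0 _; simp
  | cons w ws ih =>
    intro ns d0 h
    cases ns with
    | nil => simp at h
    | cons m ns =>
      simp only [List.length_cons, List.range_succ_eq_map, List.foldl_cons, List.foldl_map,
        List.zip_cons_cons, List.getD_cons_zero, List.getD_cons_succ]
      exact ih ns _ (by simpa using h)


lemma dictA_eq_needOf (want : List String) (number : List Int)
    (h : want.length ≤ number.length) : dictA want number = needOf want number := by
  unfold dictA needOf
  rw [PySem.List.pyRange_one]
  simp only [sub_zero, Int.toNat_natCast, List.foldl_map, zero_add, PySem.List.pyGetD_natCast]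
  exact zipfold want number PySem.Dict.empty h


lemma satC_size_iff (need : PySem.Dict String Int) (win : List String) :
    (satC need win = (need.size : Int)) ↔ winCond need win = true := by
  unfold satC winCond PySem.Dict.size
  rw [Int.natCast_inj, List.countP_eq_length, List.all_eq_true]


lemma countP_shift (l : List (String × Int)) (P Q : String × Int → Bool) (out : String)
    (h : ∀ kv : String × Int, kv.1 ≠ out → P kv = Q kv) :
    l.countP Q + l.countP (fun kv => kv.1 == out && P kv)
    = l.countP P + l.countP (fun kv => kv.1 == out && Q kv) := by
  induction l with
  | nil => simp
  | cons a t ih =>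
    simp only [List.countP_cons]
    by_cases ha : a.1 = out
    · simp only [ha, beq_self_eq_true, Bool.true_and]
      omega
    · have := h a ha
      simp only [this]
      simp [ha]
      omega


lemma countP_key_none (l : List (String × Int)) (out : String) (C : String × Int → Bool)
    (h : out ∉ l.map Prod.fst) :
    l.countP (fun kv => kv.1 == out && C kv) = 0 := by
  rw [List.countP_eq_zero]
  intro kv hkv
  have : kv.1 ≠ out := fun he => h (by rw [← he]; exact List.mem_map_of_mem hkv)
  simp [this]


lemma countP_key_some (l : List (String × Int)) (hnd : (l.map Prod.fst).Nodup)
    (out : String) (v : Int) (C : String × Int → Bool) (hv : (out, v) ∈ l) :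
    l.countP (fun kv => kv.1 == out && C kv) = if C (out, v) then 1 else 0 := by
  induction l with
  | nil => simp at hv
  | cons a t ih =>
    simp only [List.map_cons, List.nodup_cons] at hnd
    rcases List.mem_cons.1 hv with rfl | hm
    · simp only [List.countP_cons, beq_self_eq_true, Bool.true_and]
      rw [countP_key_none t out C hnd.1]
      split_ifs <;> simp_all
    · have hne : a.1 ≠ out := by
        intro he
        exact hnd.1 (he ▸ List.mem_map_of_mem hm)
      rw [List.countP_cons, ih hnd.2 hm]
      simp [hne]


lemma sat_dec (need : PySem.Dict String Int) (hnd : need.keys.Nodup)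
    (f g : String → Int) (out : String)
    (hg : ∀ k, g k = if k = out then f out - 1 else f k) :
    (↑(need.items.countP fun kv => decide (kv.2 ≤ g kv.1)) : Int)
    = (↑(need.items.countP fun kv => decide (kv.2 ≤ f kv.1)) : Int)
      + (match need.get? out with
         | some v => if f out ≥ v ∧ f out - 1 < v then (-1 : Int) else 0
         | none => 0) := by
  have hnd' : (need.items.map Prod.fst).Nodup := hnd
  have hshift := countP_shift need.items
      (fun kv => decide (kv.2 ≤ f kv.1)) (fun kv => decide (kv.2 ≤ g kv.1)) out
      (fun kv hkv => by simp only []; rw [hg kv.1, if_neg hkv])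
  cases hq : need.get? out with
  | none =>
    have hnm : out ∉ need.items.map Prod.fst :=
      (PySem.Dict.get?_eq_none_iff_not_mem_keys need out).1 hq
    rw [countP_key_none _ _ _ hnm, countP_key_none _ _ _ hnm] at hshift
    simp only []
    omega
  | some v =>
    have hv : (out, v) ∈ need.items := PySem.Dict.mem_items_of_get?_eq_some (d := need) hq
    rw [countP_key_some _ hnd' _ _ _ hv, countP_key_some _ hnd' _ _ _ hv] at hshift
    have hgo : g out = f out - 1 := by rw [hg out, if_pos rfl]
    simp only [hgo, decide_eq_true_eq] at hshift ⊢
    split_ifs at hshift ⊢ <;> omega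


lemma sat_inc (need : PySem.Dict String Int) (hnd : need.keys.Nodup)
    (f g : String → Int) (out : String)
    (hg : ∀ k, g k = if k = out then f out + 1 else f k) :
    (↑(need.items.countP fun kv => decide (kv.2 ≤ g kv.1)) : Int)
    = (↑(need.items.countP fun kv => decide (kv.2 ≤ f kv.1)) : Int)
      + (match need.get? out with
         | some v => if f out < v ∧ f out + 1 ≥ v then (1 : Int) else 0
         | none => 0) := by
  have hnd' : (need.items.map Prod.fst).Nodup := hnd
  have hshift := countP_shift need.items
      (fun kv => decide (kv.2 ≤ f kv.1)) (fun kv => decide (kv.2 ≤ g kv.1)) out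
      (fun kv hkv => by simp only []; rw [hg kv.1, if_neg hkv])
  cases hq : need.get? out with
  | none =>
    have hnm : out ∉ need.items.map Prod.fst :=
      (PySem.Dict.get?_eq_none_iff_not_mem_keys need out).1 hq
    rw [countP_key_none _ _ _ hnm, countP_key_none _ _ _ hnm] at hshift
    simp only []
    omega
  | some v =>
    have hv : (out, v) ∈ need.items := PySem.Dict.mem_items_of_get?_eq_some (d := need) hq
    rw [countP_key_some _ hnd' _ _ _ hv, countP_key_some _ hnd' _ _ _ hv] at hshift
    have hgo : g out = f out + 1 := by rw [hg out, if_pos rfl]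
    simp only [hgo, decide_eq_true_eq] at hshift ⊢
    split_ifs at hshift ⊢ <;> omega


lemma winAt_cons (l : List String) (j : Nat) (hj : j < l.length) :
    winAt l j = l.getD j "" :: (l.drop (j+1)).take 9 := by
  unfold winAt
  rw [List.drop_eq_getElem_cons hj, List.getD_eq_getElem l "" hj]
  rfl


lemma winAt_snoc (l : List String) (j : Nat) (h : j + 10 < l.length) :
    (l.drop (j+1)).take 10 = (l.drop (j+1)).take 9 ++ [l.getD (j+10) ""] := by
  rw [List.take_add_one (i := 9)]
  congr 1
  rw [List.getElem?_drop]
  rw [List.getElem?_eq_getElem (by omega), List.getD_eq_getElem l "" (by omega)]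
  rfl


lemma winAt_count_succ (l : List String) (j : Nat) (h : j + 10 < l.length) (k : String) :
    (((winAt l (j+1)).count k : Nat) : Int)
    = (((winAt l j).count k : Nat) : Int)
      + (if k = l.getD (j+10) "" then 1 else 0)
      - (if k = l.getD j "" then 1 else 0) := by
  have e1 := winAt_cons l j (by omega)
  have e2 : winAt l (j+1) = (l.drop (j+1)).take 9 ++ [l.getD (j+10) ""] :=
    winAt_snoc l j h
  rw [e1, e2]
  rw [List.count_append, List.count_cons, List.count_cons]
  have hc1 : (k = l.getD j "") ↔ (l.getD j "" = k) := eq_comm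
  have hc2 : (k = l.getD (j+10) "") ↔ (l.getD (j+10) "" = k) := eq_comm
  simp only [beq_iff_eq, hc1, hc2, List.count_nil]
  split_ifs <;> push_cast <;> omega


lemma lookup_update (c f g g2 : String → Int) (out inc : String)
    (hf : ∀ k, f k = c k)
    (hg : ∀ k, g k = if k = out then f out - 1 else f k)
    (hg2 : ∀ k, g2 k = if k = inc then g inc + 1 else g k) (k : String) :
    g2 k = c k + (if k = inc then 1 else 0) - (if k = out then 1 else 0) := by
  simp only [hg2, hg, hf]
  split_ifs <;> simp_all


lemma altStep_spec (need : PySem.Dict String Int) (hnd : need.keys.Nodup)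
    (discount : List String) (j : Nat) (hj : j + 10 < discount.length)
    (w : PySem.Dict String Int) (s ans : Int)
    (hw : ∀ k, w.getD k 0 = (((winAt discount j).count k : Nat) : Int))
    (hs : s = satC need (winAt discount j)) :
    ∃ w2 : PySem.Dict String Int,
      altStep need discount (w, s, ans) ((j : Int) + 1)
        = (w2, satC need (winAt discount (j+1)),
           ans + (if winCond need (winAt discount (j+1)) then 1 else 0))
      ∧ (∀ k, w2.getD k 0 = (((winAt discount (j+1)).count k : Nat) : Int)) := by
  have hidx1 : ((j : Int) + 1 - 1) = ((j : Nat) : Int) := by ring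
  have hidx2 : ((j : Int) + 1 + 9) = (((j + 10 : Nat) : Int)) := by push_cast; ring
  set out := discount.getD j "" with hout
  set inc := discount.getD (j+10) "" with hinc
  set w1 := w.insert out (w.getD out 0 - 1) with hw1
  set w2 := w1.insert inc (w1.getD inc 0 + 1) with hw2
  set f : String → Int := fun k => w.getD k 0 with hf
  set g : String → Int := fun k => w1.getD k 0 with hgdef
  set g2 : String → Int := fun k => w2.getD k 0 with hg2def
  have hg : ∀ k, g k = if k = out then f out - 1 else f k := by
    intro k
    simp only [hgdef, hw1, hf, PySem.Dict.getD_insert]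
  have hg2 : ∀ k, g2 k = if k = inc then g inc + 1 else g k := by
    intro k
    simp only [hg2def, hw2, hgdef, PySem.Dict.getD_insert]
  have hfc : ∀ k, f k = (((winAt discount j).count k : Nat) : Int) := by
    intro k; simp only [hf, hw]
  have hg2count : ∀ k, g2 k = (((winAt discount (j+1)).count k : Nat) : Int) := by
    intro k
    rw [winAt_count_succ discount j hj k, ← hout, ← hinc]
    exact lookup_update _ f g g2 out inc hfc hg hg2 k
  have hcountf : (↑(need.items.countP fun kv => decide (kv.2 ≤ f kv.1)) : Int)
      = satC need (winAt discount j) := by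
    unfold satC
    congr 1
    refine List.countP_congr ?_
    intro kv _
    simp only [hfc]
  have hsat1 : (match need.get? out with
      | some v => if f out ≥ v ∧ f out - 1 < v then s - 1 else s
      | none => s)
      = (↑(need.items.countP fun kv => decide (kv.2 ≤ g kv.1)) : Int) := by
    rw [sat_dec need hnd f g out hg, hcountf, ← hs]
    cases need.get? out with
    | none => simp
    | some v => dsimp only; split_ifs <;> ring
  have hsatC2 : (↑(need.items.countP fun kv => decide (kv.2 ≤ g2 kv.1)) : Int)
      = satC need (winAt discount (j+1)) := by
    unfold satC
    congr 1
    refine List.countP_congr ?_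
    intro kv _
    simp only [hg2count]
  have hsat2 : (match need.get? inc with
      | some v => if g inc < v ∧ g inc + 1 ≥ v then
          (↑(need.items.countP fun kv => decide (kv.2 ≤ g kv.1)) : Int) + 1
        else (↑(need.items.countP fun kv => decide (kv.2 ≤ g kv.1)) : Int)
      | none => (↑(need.items.countP fun kv => decide (kv.2 ≤ g kv.1)) : Int))
      = satC need (winAt discount (j+1)) := by
    rw [← hsatC2, sat_inc need hnd g g2 inc hg2]
    cases need.get? inc with
    | none => simp
    | some v => dsimp only; split_ifs <;> ring
  refine ⟨w2, ?_, hg2count⟩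
  unfold altStep
  simp only [hidx1, hidx2, PySem.List.pyGetD_natCast, ← hout, ← hinc, ← hw1, ← hw2]
  rw [hsat1, hsat2]
  have hans : (if satC need (winAt discount (j+1)) = (need.size : Int) then ans + 1 else ans)
      = ans + (if winCond need (winAt discount (j+1)) then 1 else 0) := by
    by_cases hc : winCond need (winAt discount (j+1)) = true
    · rw [if_pos ((satC_size_iff need _).2 hc), if_pos hc]
    · rw [if_neg (fun h => hc ((satC_size_iff need _).1 h)), if_neg hc]
      ring
  rw [hans]


lemma aCount_one (need : PySem.Dict String Int) (discount : List String) :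
    aCount need discount 1 = if winCond need (winAt discount 0) then 1 else 0 := by
  unfold aCount
  rw [List.range_one]
  simp [List.countP_cons, apply_ite]


lemma aCount_succ (need : PySem.Dict String Int) (discount : List String) (u : Nat) :
    aCount need discount (u+1)
      = aCount need discount u + (if winCond need (winAt discount u) then 1 else 0) := by
  unfold aCount
  rw [List.range_succ, List.countP_append]
  simp [List.countP_cons, apply_ite]


lemma loop_inv (need : PySem.Dict String Int) (hnd : need.keys.Nodup)
    (discount : List String) (w0 : PySem.Dict String Int) (s0 ans0 : Int)
    (hw0 : ∀ k, w0.getD k 0 = (((winAt discount 0).count k : Nat) : Int))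
    (hs0 : s0 = satC need (winAt discount 0))
    (ha0 : ans0 = aCount need discount 1) :
    ∀ u : Nat, 1 ≤ u → u ≤ discount.length - 9 →
    ∃ w : PySem.Dict String Int,
      (PySem.List.pyRange 1 (u : Int) 1).foldl (altStep need discount) (w0, s0, ans0)
        = (w, satC need (winAt discount (u-1)), aCount need discount u)
      ∧ ∀ k, w.getD k 0 = (((winAt discount (u-1)).count k : Nat) : Int) := by
  intro u hu
  induction u, hu using Nat.le_induction with
  | base =>
    intro _
    refine ⟨w0, ?_, hw0⟩
    rw [show PySem.List.pyRange 1 ((1:Nat):Int) 1 = [] from PySem.List.pyRange_one_eq_nil (by norm_num)]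
    simp only [List.foldl_nil]
    rw [hs0, ha0]
  | succ u hu ih =>
    intro hle
    obtain ⟨w, heq, hwk⟩ := ih (by omega)
    have hcast : ((u + 1 : Nat) : Int) = ((u : Int)) + 1 := by push_cast; ring
    have hsplit : PySem.List.pyRange 1 ((u+1 : Nat) : Int) 1
        = PySem.List.pyRange 1 (u : Int) 1 ++ [(u : Int)] := by
      rw [hcast]
      exact PySem.List.pyRange_one_succ_right (a := 1) (b := (u : Int)) (by exact_mod_cast hu)
    rw [hsplit, List.foldl_append, heq]
    simp only [List.foldl_cons, List.foldl_nil]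
    have hj : (u - 1) + 10 < discount.length := by omega
    have hidx : ((u : Int)) = (((u-1 : Nat) : Int)) + 1 := by omega
    obtain ⟨w2, hstep, hw2⟩ := altStep_spec need hnd discount (u-1) hj w
        (satC need (winAt discount (u-1))) (aCount need discount u) hwk rfl
    rw [hidx, hstep]
    have hu1 : (u - 1) + 1 = u := by omega
    rw [hu1] at hw2 ⊢
    refine ⟨w2, ?_, hw2⟩
    rw [← aCount_succ]
    simp


lemma needOf_nodup (want : List String) (number : List Int) :
    (needOf want number).keys.Nodup := by
  unfold needOf
  exact PySem.Dict.nodup_keys_foldl_insert_key (want.zip number) Prod.fst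
    (fun _ kv => kv.2) PySem.Dict.empty (by simp [PySem.Dict.keys_empty])


lemma alt_eq_aCount (want : List String) (number : List Int) (discount : List String) :
    solution_alt want number discount
      = aCount (needOf want number) discount (discount.length - 9) := by
  unfold solution_alt
  by_cases hlt : discount.length < 10
  · rw [if_pos hlt]
    have h0 : discount.length - 9 = 0 := by omega
    rw [h0]
    unfold aCount
    simp
  · rw [if_neg hlt]
    dsimp only
    have hslice : PySem.List.slice discount (some 0) (some 10) = winAt discount 0 := by
      rw [PySem.List.slice_zero_start, PySem.List.slice_to discount (by norm_num)]
      unfold winAt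
      rw [List.drop_zero]
      rfl
    rw [hslice]
    rw [PySem.Dict.foldl_insert_getD_add_one_eq_counter]
    have hw0 : ∀ k, (PySem.Dict.counter (winAt discount 0)).getD k 0
        = (((winAt discount 0).count k : Nat) : Int) := by
      intro k
      exact PySem.Dict.getD_counter _ _
    have hsat0 : (needOf want number).items.foldl
        (fun s kv => if (PySem.Dict.counter (winAt discount 0)).getD kv.1 0 ≥ kv.2
          then s + 1 else s) 0
        = satC (needOf want number) (winAt discount 0) := by
      rw [PySem.List.foldl_ite_add_one
        (p := fun kv : String × Int => (PySem.Dict.counter (winAt discount 0)).getD kv.1 0 ≥ kv.2)]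
      unfold satC
      rw [zero_add]
      congr 1
      refine List.countP_congr ?_
      intro kv _
      simp [hw0, ge_iff_le]
    rw [hsat0]
    have hans0 : (if satC (needOf want number) (winAt discount 0)
          = ((needOf want number).size : Int) then (1:Int) else 0)
        = aCount (needOf want number) discount 1 := by
      rw [aCount_one]
      by_cases hc : winCond (needOf want number) (winAt discount 0) = true
      · rw [if_pos ((satC_size_iff _ _).2 hc), if_pos hc]
      · rw [if_neg (fun h => hc ((satC_size_iff _ _).1 h)), if_neg hc]
    rw [hans0]
    have hbound : ((discount.length : Int) - 9) = (((discount.length - 9 : Nat)) : Int) := by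
      omega
    rw [hbound]
    obtain ⟨w, heq, -⟩ := loop_inv (needOf want number) (needOf_nodup want number) discount
      (PySem.Dict.counter (winAt discount 0)) _ _ hw0 rfl rfl
      (discount.length - 9) (by omega) (le_refl _)
    rw [heq]


-- ===== VERDICT (by name: the statement is the Claim_ definition above) =====
theorem solution_spec : Claim_equal_solution := by
  intro want number discount _ hpre
  show solution want number discount = solution_alt want number discount
  rw [solution_eq_aCount, alt_eq_aCount, dictA_eq_needOf want number hpre]
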